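-- pv_equiv track=rewrite | github.com/hyeinisfree/kings-algorithm-study | chaewon/week1/모의고사.py | solution
-- ===== SOURCE A (Python) =====
-- def solution(answers):
--     scores = [0, 0, 0]
--
--     one = [1, 2, 3, 4, 5]
--     two = [2, 1, 2, 3, 2, 4, 2, 5]
--     three = [3, 3, 1, 1, 2, 2, 4, 4, 5, 5]
--
--     for i, answer in enumerate(answers):
--         if answer == one[i % len(one)]:
--             scores[0] += 1
--         if answer == two[i % len(two)]:
--             scores[1] += 1
--         if answer == three[i % len(three)]:
--             scores[2] += 1
--
--     answer = []
--     max_score = max(scores)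
--     for i, score in enumerate(scores):
--         if score == max_score:
--             answer.append(i+1)
--     return answer
-- ===== SOURCE B (Python) =====
-- def solution(answers):
--     # All three patterns repeat with period lcm(5, 8, 10) = 40, so one pass
--     # builds a counter keyed by (position mod 40, answer); each score is then
--     # a fixed 40-term sum of counter lookups -- no per-answer pattern compares.
--     counts = {}
--     for i, a in enumerate(answers):
--         key = (i % 40, a)
--         counts[key] = counts.get(key, 0) + 1
--     patterns = [[1, 2, 3, 4, 5],
--                 [2, 1, 2, 3, 2, 4, 2, 5],
--                 [3, 3, 1, 1, 2, 2, 4, 4, 5, 5]]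
--     scores = [sum(counts.get((r, p[r % len(p)]), 0) for r in range(40))
--               for p in patterns]
--     m = max(scores)
--     return [i + 1 for i, s in enumerate(scores) if s == m]
-- ===== Notes on version B (the rewrite author's own statement) =====
-- stated objective: alternative
-- what changed: Instead of comparing every answer against the three cyclic patterns, B builds in one pass a counter keyed by (index mod 40, answer) (40 = lcm of the pattern periods) and obtains each score as a fixed 40-term sum of counter lookups; the argmax filter is a comprehension over the score list.
import Mathlib
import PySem

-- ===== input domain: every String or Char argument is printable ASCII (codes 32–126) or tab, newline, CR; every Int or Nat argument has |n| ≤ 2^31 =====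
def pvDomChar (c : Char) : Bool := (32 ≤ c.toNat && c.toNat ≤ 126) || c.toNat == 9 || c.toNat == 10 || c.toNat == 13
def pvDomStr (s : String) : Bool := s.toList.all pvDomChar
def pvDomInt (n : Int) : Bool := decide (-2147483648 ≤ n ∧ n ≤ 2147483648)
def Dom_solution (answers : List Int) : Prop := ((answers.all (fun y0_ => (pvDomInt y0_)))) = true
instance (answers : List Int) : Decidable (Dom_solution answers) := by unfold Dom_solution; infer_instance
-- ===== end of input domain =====

-- B replaces A's per-answer comparison against the three cyclic patterns by a counter
-- keyed by (index mod 40, answer) (40 = lcm of the pattern periods), each score becoming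
-- a fixed 40-term sum of counter lookups: an alternative, index-based algorithm.

-- ===== PORT A =====
def pvOne : List Int := [1, 2, 3, 4, 5]
def pvTwo : List Int := [2, 1, 2, 3, 2, 4, 2, 5]
def pvThree : List Int := [3, 3, 1, 1, 2, 2, 4, 4, 5, 5]

-- A's fused loop: for i, answer in enumerate(answers): update the three scores
def pvALoop : List Int → Nat → Int × Int × Int → Int × Int × Int
  | [], _, s => s
  | a :: rest, i, (s1, s2, s3) =>
      pvALoop rest (i + 1)
        ((if a = pvOne.getD (i % pvOne.length) 0 then s1 + 1 else s1),
         (if a = pvTwo.getD (i % pvTwo.length) 0 then s2 + 1 else s2),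
         (if a = pvThree.getD (i % pvThree.length) 0 then s3 + 1 else s3))

def solution (answers : List Int) : List Int :=
  let s := pvALoop answers 0 (0, 0, 0)
  let scores : List Int := [s.1, s.2.1, s.2.2]
  let maxScore := max s.1 (max s.2.1 s.2.2)   -- max(scores) on a 3-element list
  -- answer = []; for i, score in enumerate(scores): if score == max_score: answer.append(i+1)
  (PySem.List.enumerate scores).foldl
    (fun acc p => if p.2 = maxScore then acc ++ [p.1 + 1] else acc) []

-- ===== PORT B =====
def pvPatterns : List (List Int) :=
  [[1, 2, 3, 4, 5], [2, 1, 2, 3, 2, 4, 2, 5], [3, 3, 1, 1, 2, 2, 4, 4, 5, 5]]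

-- for i, a in enumerate(answers): counts[(i % 40, a)] = counts.get((i % 40, a), 0) + 1
def pvCounts (answers : List Int) : PySem.Dict (Int × Int) Int :=
  (PySem.List.enumerate answers).foldl
    (fun d q => d.insert (PySem.Int.mod q.1 40, q.2)
                  (d.getD (PySem.Int.mod q.1 40, q.2) 0 + 1))
    PySem.Dict.empty

-- sum(counts.get((r, p[r % len(p)]), 0) for r in range(40))
def pvScoreB (counts : PySem.Dict (Int × Int) Int) (p : List Int) : Int :=
  (PySem.List.pyRange 0 40 1).foldl
    (fun s r => s + counts.getD (r, PySem.List.pyGetD p (PySem.Int.mod r (p.length : Int)) 0) 0) 0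

def solution_alt (answers : List Int) : List Int :=
  let counts := pvCounts answers
  let scores := pvPatterns.map (pvScoreB counts)
  let m := max (scores.getD 0 0) (max (scores.getD 1 0) (scores.getD 2 0))  -- max(scores)
  (PySem.List.enumerate scores).filterMap
    (fun q => if q.2 = m then some (q.1 + 1) else none)

-- ===== PRECONDITION & SPEC =====
def Spec_solution (answers : List Int) (out : List Int) : Prop := out = solution_alt answers
instance (answers : List Int) (out : List Int) : Decidable (Spec_solution answers out) := by unfold Spec_solution; infer_instance

-- ===== CLAIM =====
def Claim_equal_solution : Prop := ∀ (answers : List Int), Dom_solution answers → Spec_solution answers (solution answers)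

-- ===== LEMMAS AND PROOFS =====
-- common yardstick: the number of indices i (counted from start i0) with l[i] = p[i % len p]
def pvScoreNat (p : List Int) : List Int → Nat → Int
  | [], _ => 0
  | a :: rest, i =>
      (if a = p.getD (i % p.length) 0 then 1 else 0) + pvScoreNat p rest (i + 1)

-- A's fused scan computes, componentwise, the three per-pattern counts
theorem pvALoop_eq (l : List Int) (i : Nat) (s1 s2 s3 : Int) :
    pvALoop l i (s1, s2, s3) =
      (s1 + pvScoreNat pvOne l i, s2 + pvScoreNat pvTwo l i, s3 + pvScoreNat pvThree l i) := by
  induction l generalizing i s1 s2 s3 with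
  | nil => simp [pvALoop, pvScoreNat]
  | cons a rest ih =>
      simp only [pvALoop, pvScoreNat, ih]
      refine Prod.ext ?_ (Prod.ext ?_ ?_) <;> (simp only [] ; split_ifs <;> ring)

-- sum of an equality-indicator over a nodup list rs ∋ m: only the r = m term can fire
theorem pvIndSum (rs : List Int) (m a : Int) (w : Int → Int)
    (hnd : rs.Nodup) (hm : m ∈ rs) :
    ((rs.map (fun r => if (((m, a) : Int × Int) = (r, w r)) then (1 : Int) else 0)).sum)
      = if a = w m then 1 else 0 := by
  induction rs with
  | nil => cases hm
  | cons r0 rest ih =>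
      simp only [List.map_cons, List.sum_cons]
      rcases List.mem_cons.mp hm with h0 | hrest
      · subst h0
        have hnot : m ∉ rest := (List.nodup_cons.mp hnd).1
        have hz : ((rest.map (fun r => if (((m, a) : Int × Int) = (r, w r)) then (1 : Int) else 0)).sum) = 0 := by
          apply List.sum_eq_zero
          intro x hx
          rcases List.mem_map.mp hx with ⟨r, hr, hrx⟩
          have hne : m ≠ r := fun h => hnot (h ▸ hr)
          simpa [Prod.ext_iff, hne] using hrx.symm
        rw [hz]
        by_cases h : a = w m <;> simp [Prod.ext_iff, h]
      · have hne : m ≠ r0 := by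
          intro h; exact (List.nodup_cons.mp hnd).1 (h ▸ hrest)
        rw [ih (List.nodup_cons.mp hnd).2 hrest]
        simp [Prod.ext_iff, hne]

-- the 40-term lookup sum over the (index mod 40, answer) keys counts pvScoreNat
theorem pvKeySum (p : List Int) (hL : p.length ∣ 40) :
    ∀ (l : List Int) (i : Nat),
    (((PySem.List.pyRange 0 40 1).map
        (fun r => ((((PySem.List.enumerate l (i : Int)).map
            (fun q => ((PySem.Int.mod q.1 40, q.2) : Int × Int))).count
          (r, PySem.List.pyGetD p (PySem.Int.mod r (p.length : Int)) 0) : Nat) : Int))).sum)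
      = pvScoreNat p l i := by
  intro l
  induction l with
  | nil => intro i; simp [pvScoreNat, PySem.List.enumerate_nil]
  | cons a rest ih =>
      intro i
      have hcast : ((i : Int) + 1) = ((i + 1 : Nat) : Int) := by push_cast; ring
      have hmod : PySem.Int.mod (i : Int) 40 = ((i % 40 : Nat) : Int) := by
        exact_mod_cast PySem.Int.mod_natCast i 40
      rw [PySem.List.enumerate_cons]
      simp only [List.map_cons, hcast, List.count_cons]
      push_cast
      rw [PySem.List.sum_map_add_int]
      rw [hcast, ih (i + 1), hmod]
      simp only [beq_iff_eq]
      rw [pvIndSum _ _ _ _ (PySem.List.nodup_pyRange_one 0 40)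
          (by rw [PySem.List.mem_pyRange_one]
              constructor
              · positivity
              · exact_mod_cast Nat.mod_lt i (by norm_num))]
      have hmod2 : PySem.Int.mod ((i % 40 : Nat) : Int) ((p.length : Nat) : Int)
          = ((i % p.length : Nat) : Int) := by
        rw [PySem.Int.mod_natCast]
        rw [Nat.mod_mod_of_dvd i hL]
      rw [hmod2, PySem.List.pyGetD_natCast]
      simp [pvScoreNat, add_comm]

-- B's counter is Counter of the key list
theorem pvCounts_eq (answers : List Int) :
    pvCounts answers =
      PySem.Dict.counter ((PySem.List.enumerate answers (0 : Int)).map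
        (fun q => ((PySem.Int.mod q.1 40, q.2) : Int × Int))) := by
  unfold pvCounts
  rw [← PySem.Dict.foldl_insert_getD_add_one_eq_counter, List.foldl_map]

-- the final max-filter passes agree on a 3-element scores list
theorem pvFinal (x y z : Int) :
    (PySem.List.enumerate [x, y, z]).foldl
      (fun acc p => if p.2 = max x (max y z) then acc ++ [p.1 + 1] else acc) [] =
    (PySem.List.enumerate [x, y, z]).filterMap
      (fun p => if p.2 = max x (max y z) then some (p.1 + 1) else none) := by
  simp only [PySem.List.enumerate_cons, PySem.List.enumerate_nil,
    List.foldl_cons, List.foldl_nil, List.filterMap_cons, List.filterMap_nil]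
  split_ifs <;> rfl

theorem pvScoreB_eq (answers : List Int) (p : List Int) (hL : p.length ∣ 40) :
    pvScoreB (pvCounts answers) p = pvScoreNat p answers 0 := by
  unfold pvScoreB
  rw [PySem.List.foldl_add (g := fun r =>
    (pvCounts answers).getD (r, PySem.List.pyGetD p (PySem.Int.mod r (p.length : Int)) 0) 0)]
  rw [pvCounts_eq]
  simp only [PySem.Dict.getD_counter, zero_add]
  exact pvKeySum p hL answers 0

-- ===== VERDICT =====
theorem solution_spec : Claim_equal_solution := by
  intro answers _
  unfold Spec_solution solution solution_alt
  simp only [pvALoop_eq, zero_add, pvPatterns, List.map_cons, List.map_nil,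
    List.getD_cons_zero, List.getD_cons_succ]
  rw [pvScoreB_eq answers _ (by decide), pvScoreB_eq answers _ (by decide),
      pvScoreB_eq answers _ (by decide)]
  exact pvFinal _ _ _
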